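-- pv_equiv track=rewrite | github.com/eio-ta/argumentation_framework | files/class_af.py | preferred
-- ===== SOURCE A (Python) =====
-- def preferred(completed):
--     if(len(completed) == 1):
--         return completed
--     else:
--         res = []
--         for i in range(len(completed)):
--             tmp = True
--             for j in range(len(completed)):
--                 if(all(elem in completed[j] for elem in completed[i]) == False):
--                     tmp = False
--             if(tmp == False):
--                 res.append(completed[i])
--         return res
-- ===== SOURCE B (Python) =====
-- def preferred(completed):
--     if len(completed) == 1:
--         return completed
--     inter = set(completed[0]) if completed else set()
--     for s in completed[1:]:
--         inter = inter & set(s)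
--     return [s for s in completed if not set(s) <= inter]
-- ===== Notes on version B (the rewrite author's own statement) =====
-- stated objective: faster
-- what changed: Instead of testing every set against every other set (all-pairs subset checks), B computes the intersection of all sets once and keeps each set unless it is a subset of that intersection.
import Mathlib
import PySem

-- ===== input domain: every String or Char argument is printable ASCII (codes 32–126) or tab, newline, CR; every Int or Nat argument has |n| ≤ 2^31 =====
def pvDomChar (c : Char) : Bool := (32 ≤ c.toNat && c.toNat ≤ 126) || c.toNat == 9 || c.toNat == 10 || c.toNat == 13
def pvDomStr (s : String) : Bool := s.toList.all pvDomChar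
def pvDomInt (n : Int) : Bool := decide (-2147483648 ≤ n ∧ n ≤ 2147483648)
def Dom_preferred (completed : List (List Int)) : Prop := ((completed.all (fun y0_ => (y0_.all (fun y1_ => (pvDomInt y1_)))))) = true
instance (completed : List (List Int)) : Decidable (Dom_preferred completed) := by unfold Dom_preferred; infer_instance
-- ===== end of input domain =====

-- B replaces A's quadratic all-pairs subset test by one pass building the intersection
-- of all sets, then filters by subset-of-intersection (objective: faster, asymptotic).

-- ===== PORT A =====
def preferred (completed : List (List Int)) : List (List Int) :=
  if completed.length == 1 then completed
  else
    (PySem.List.pyRange 0 (completed.length : Int) 1).foldl (fun res i =>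
      let tmp := (PySem.List.pyRange 0 (completed.length : Int) 1).foldl (fun tmp j =>
        if ((PySem.List.pyGetD completed i []).all
              (fun elem => (PySem.List.pyGetD completed j []).contains elem)) == false
        then false else tmp) true
      if tmp == false then res ++ [PySem.List.pyGetD completed i []] else res) []

-- ===== PORT B =====
def preferred_alt (completed : List (List Int)) : List (List Int) :=
  if completed.length == 1 then completed
  else
    let inter := (completed.drop 1).foldl
      (fun acc s => PySem.Set.inter acc (PySem.Set.ofList s))
      (if completed.isEmpty then PySem.Set.empty else PySem.Set.ofList (completed.headD []))
    completed.filter (fun s => !(PySem.Set.issubset (PySem.Set.ofList s) inter))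

-- ===== PRECONDITION & SPEC =====
def Spec_preferred (completed : List (List Int)) (out : List (List Int)) : Prop := out = preferred_alt completed
instance (completed : List (List Int)) (out : List (List Int)) : Decidable (Spec_preferred completed out) := by unfold Spec_preferred; infer_instance

-- ===== CLAIM (what is proved, stated in full; the proofs are below) =====
def Claim_equal_preferred : Prop := ∀ (completed : List (List Int)), Dom_preferred completed → Spec_preferred completed (preferred completed)

-- ===== LEMMAS AND PROOFS =====

-- A's inner loop: fold of "set to false on a failed check" is the conjunction of the checks
theorem pv_foldl_false_all (l : List (List Int)) (g : List Int → Bool) (b0 : Bool) :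
    l.foldl (fun b t => if g t == false then false else b) b0 = (b0 && l.all g) := by
  induction l generalizing b0 with
  | nil => simp
  | cons h t ih =>
      simp only [List.foldl_cons, List.all_cons, ih]
      cases hg : g h <;> simp

-- membership in the folded intersection of sets
theorem pv_mem_foldl_inter (tl : List (List Int)) (acc : PySem.Set Int) (x : Int) :
    x ∈ tl.foldl (fun a s => PySem.Set.inter a (PySem.Set.ofList s)) acc ↔
      x ∈ acc ∧ ∀ t ∈ tl, x ∈ t := by
  induction tl generalizing acc with
  | nil => simp
  | cons h t ih =>
      simp only [List.foldl_cons, ih, PySem.Set.mem_inter, PySem.Set.mem_ofList,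
        List.mem_cons]
      constructor
      · rintro ⟨⟨hx, hh⟩, ht⟩
        exact ⟨hx, fun s hs => hs.elim (fun e => e ▸ hh) (ht s)⟩
      · rintro ⟨hx, ht⟩
        exact ⟨⟨hx, ht h (Or.inl rfl)⟩, fun s hs => ht s (Or.inr hs)⟩

theorem preferred_spec : Claim_equal_preferred := by
  intro completed _
  unfold Spec_preferred preferred preferred_alt
  by_cases h1 : completed.length == 1
  · simp [h1]
  · simp only [h1, Bool.false_eq_true, if_false]
    cases completed with
    | nil => rfl
    | cons hd tl =>
      simp only [List.isEmpty_cons, List.headD_cons, List.drop_succ_cons, List.drop_zero,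
        Bool.false_eq_true, if_false]
      -- the inner loop, for every i, equals a fold over the list itself
      have hinner : ∀ (i : Int),
          (PySem.List.pyRange 0 ((hd :: tl).length : Int) 1).foldl (fun tmp j =>
            if ((PySem.List.pyGetD (hd :: tl) i []).all
                  (fun elem => (PySem.List.pyGetD (hd :: tl) j []).contains elem)) == false
            then false else tmp) true
          = (hd :: tl).foldl (fun tmp t =>
              if ((PySem.List.pyGetD (hd :: tl) i []).all (fun e => t.contains e)) == false
              then false else tmp) true :=
        fun i => PySem.List.foldl_pyRange_zero_pyGetD' (hd :: tl) []
          (fun tmp t => if ((PySem.List.pyGetD (hd :: tl) i []).all (fun e => t.contains e)) == false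
            then false else tmp) true
      have hA : (PySem.List.pyRange 0 (((hd :: tl).length : Int)) 1).foldl (fun res i =>
            let tmp := (PySem.List.pyRange 0 ((hd :: tl).length : Int) 1).foldl (fun tmp j =>
              if ((PySem.List.pyGetD (hd :: tl) i []).all
                    (fun elem => (PySem.List.pyGetD (hd :: tl) j []).contains elem)) == false
              then false else tmp) true
            if tmp == false then res ++ [PySem.List.pyGetD (hd :: tl) i []] else res) []
          = (hd :: tl).foldl (fun res s =>
              if ((hd :: tl).all (fun t => s.all (fun e => t.contains e))) == false
              then res ++ [s] else res) [] := by
        rw [PySem.List.foldl_congr_mem (PySem.List.pyRange 0 (((hd :: tl).length : Int)) 1) _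
          (fun res i =>
            (fun res (s : List Int) =>
              if ((hd :: tl).all (fun t => s.all (fun e => t.contains e))) == false
              then res ++ [s] else res) res (PySem.List.pyGetD (hd :: tl) i [])) []
          (fun res i _ => by
            simp only [hinner i, pv_foldl_false_all, Bool.true_and])]
        exact PySem.List.foldl_pyRange_zero_pyGetD' (hd :: tl) []
          (fun res (s : List Int) =>
            if ((hd :: tl).all (fun t => s.all (fun e => t.contains e))) == false
            then res ++ [s] else res) []
      rw [hA]
      rw [show ((hd :: tl).foldl (fun res s =>
              if ((hd :: tl).all (fun t => s.all (fun e => t.contains e))) == false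
              then res ++ [s] else res) []) =
            ((hd :: tl).foldl (fun res s =>
              if (fun s => ((hd :: tl).all (fun t => s.all (fun e => t.contains e))) == false) s
              then res ++ [s] else res) []) from rfl,
        PySem.List.foldl_append_if_eq_filter]
      simp only [List.nil_append]
      apply List.filter_congr
      intro s _
      have hmem : ∀ x : Int,
          x ∈ tl.foldl (fun a t => PySem.Set.inter a (PySem.Set.ofList t)) (PySem.Set.ofList hd)
          ↔ x ∈ hd ∧ ∀ t ∈ tl, x ∈ t := by
        intro x
        rw [pv_mem_foldl_inter]
        simp [PySem.Set.mem_ofList]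
      cases hall : ((hd :: tl).all (fun t => s.all (fun e => t.contains e))) with
      | false =>
        rw [Bool.eq_false_iff] at hall
        simp only [ne_eq, List.all_eq_true, List.contains_eq_mem, decide_eq_true_eq,
          not_forall] at hall
        obtain ⟨t, ht, e, he, hne⟩ := hall
        have hsub : ¬ (PySem.Set.issubset (PySem.Set.ofList s)
            (tl.foldl (fun a t => PySem.Set.inter a (PySem.Set.ofList t)) (PySem.Set.ofList hd)) = true) := by
          rw [PySem.Set.issubset_iff]
          push Not
          refine ⟨e, by simp [PySem.Set.mem_ofList, he], ?_⟩
          rw [hmem e]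
          rcases List.mem_cons.mp ht with ht | ht
          · exact fun hc => hne (ht ▸ hc.1)
          · exact fun hc => hne (hc.2 t ht)
        simp [Bool.eq_false_iff.mpr hsub]
      | true =>
        rw [List.all_eq_true] at hall
        have hsub : PySem.Set.issubset (PySem.Set.ofList s)
            (tl.foldl (fun a t => PySem.Set.inter a (PySem.Set.ofList t)) (PySem.Set.ofList hd)) = true := by
          rw [PySem.Set.issubset_iff]
          intro x hx
          rw [PySem.Set.mem_ofList] at hx
          rw [hmem x]
          have h' : ∀ t ∈ hd :: tl, ∀ e ∈ s, e ∈ t := by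
            intro t ht e he
            have := hall t ht
            rw [List.all_eq_true] at this
            have := this e he
            rwa [List.contains_eq_mem, decide_eq_true_eq] at this
          exact ⟨h' hd (List.mem_cons_self) x hx, fun t ht => h' t (List.mem_cons_of_mem _ ht) x hx⟩
        simp [hsub]
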